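-- pv_equiv track=rewrite | github.com/ayalkaabia/Artificial_Intelligence_Project_Lab1 | Lab 1.py | lcs_fitness
-- ===== SOURCE A (Python) =====
-- def lcs_fitness(individual_str, target_str, bonus_for_match=5):
--     """
--     individual_str: The individual's chromosome, target_str: The target string, bonus_for_match: Bonus points for characters in correct positions
--     Returns: Fitness score
--     """
--     m = len(individual_str)
--     n = len(target_str)
--     # Create LCS table using dynamic programming
--     dp = [[0] * (n + 1) for _ in range(m + 1)]
--     # Fill the dp table
--     for i in range(1, m + 1):
--         for j in range(1, n + 1):
--             if individual_str[i - 1] == target_str[j - 1]: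
--                 dp[i][j] = dp[i - 1][j - 1] + 1
--             else:
--                 dp[i][j] = max(dp[i - 1][j], dp[i][j - 1])
--
--     # LCS length
--     lcs_length = dp[m][n]
--
--     # Calculate exact matches bonus
--     exact_matches = 0
--     for i in range(m):
--         if i < n and individual_str[i] == target_str[i]:
--             exact_matches += 1
--
--     # The fitness is: max possible score - (LCS length + bonus * exact matches)
--     # We subtract from the max possible score to make it a minimization problem
--     max_possible_score = len(target_str) + bonus_for_match * len(target_str)
--     fitness = max_possible_score - (lcs_length + bonus_for_match * exact_matches)
--
--     return fitness
-- ===== SOURCE B (Python) =====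
-- def lcs_fitness(individual_str, target_str, bonus_for_match=5):
--     """
--     Same fitness as A, but the LCS length is computed by top-down memoized
--     recursion (a dict memo over (i, j) prefixes) instead of filling a full
--     bottom-up 2D table, and exact position matches are a zip-sum.
--     """
--     m = len(individual_str)
--     n = len(target_str)
--     memo = {}
--
--     def lcs(i, j):
--         if (i, j) in memo:
--             return memo[(i, j)]
--         if i == 0 or j == 0:
--             v = 0
--         elif individual_str[i - 1] == target_str[j - 1]:
--             v = lcs(i - 1, j - 1) + 1
--         else:
--             v = max(lcs(i - 1, j), lcs(i, j - 1))
--         memo[(i, j)] = v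
--         return v
--
--     lcs_length = lcs(m, n)
--     exact_matches = sum(a == b for a, b in zip(individual_str, target_str))
--     max_possible_score = n + bonus_for_match * n
--     return max_possible_score - (lcs_length + bonus_for_match * exact_matches)
-- ===== Notes on version B (the rewrite author's own statement) =====
-- stated objective: alternative
-- what changed: Replaces the bottom-up (m+1)x(n+1) LCS table filled by nested index loops with top-down memoized recursion on prefix lengths (dict memo, only reachable subproblems computed), and counts exact position matches with a zip-sum instead of an index loop; the fitness formula is unchanged.
import Mathlib
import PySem

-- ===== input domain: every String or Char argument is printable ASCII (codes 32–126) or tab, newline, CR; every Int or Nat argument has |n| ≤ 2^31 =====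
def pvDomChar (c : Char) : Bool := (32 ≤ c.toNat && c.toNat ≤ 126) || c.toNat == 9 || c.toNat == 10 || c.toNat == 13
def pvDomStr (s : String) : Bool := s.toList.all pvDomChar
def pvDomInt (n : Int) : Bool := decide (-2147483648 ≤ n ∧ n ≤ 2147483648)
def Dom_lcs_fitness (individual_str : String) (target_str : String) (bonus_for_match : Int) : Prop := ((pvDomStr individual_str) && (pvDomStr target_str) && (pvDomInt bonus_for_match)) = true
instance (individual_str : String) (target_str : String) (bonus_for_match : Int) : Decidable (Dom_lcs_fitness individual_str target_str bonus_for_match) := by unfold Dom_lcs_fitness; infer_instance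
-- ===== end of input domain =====

-- B computes the LCS length by top-down memoized recursion on prefix lengths (a dict memo)
-- instead of A's bottom-up nested-loop 2D table, and counts exact position matches with a
-- zip-sum; same return value (objective: alternative).

-- ===== PORT A =====
-- A-side helper: the body of A's inner 'for j in range(1, n + 1)' loop (one cell update of dp)
def pvBodyA (sl tl : List Char) (i : Nat) (dp : List (List Int)) (j : Nat) : List (List Int) :=
  let v : Int :=
    if sl.getD (i - 1) ' ' = tl.getD (j - 1) ' ' then
      (dp.getD (i - 1) []).getD (j - 1) 0 + 1
    else
      max ((dp.getD (i - 1) []).getD j 0) ((dp.getD i []).getD (j - 1) 0)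
  dp.set i ((dp.getD i []).set j v)

-- Literal port of A: full 2D DP table filled cell by cell, then an index loop for exact matches.
def lcs_fitness (individual_str : String) (target_str : String) (bonus_for_match : Int) : Int :=
  let sl := individual_str.toList
  let tl := target_str.toList
  let m := sl.length
  let n := tl.length
  let dp0 : List (List Int) := List.replicate (m + 1) (List.replicate (n + 1) 0)
  let dp := (List.range' 1 m).foldl
    (fun dp i => (List.range' 1 n).foldl (pvBodyA sl tl i) dp) dp0
  let lcs_length := (dp.getD m []).getD n 0
  let exact_matches := (List.range m).foldl
    (fun acc i => if i < n ∧ sl.getD i ' ' = tl.getD i ' ' then acc + 1 else acc) (0 : Int)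
  let max_possible_score := (n : Int) + bonus_for_match * (n : Int)
  max_possible_score - (lcs_length + bonus_for_match * exact_matches)

-- ===== PORT B =====
-- B-side helper: Source B's inner 'def lcs(i, j)' with its dict memo threaded explicitly
-- (memo hit returns; otherwise compute v through the sub-calls, store memo[(i,j)] = v, return v).
def pvLcs (sl tl : List Char) : Nat → Nat → PySem.Dict (Nat × Nat) Int → Int × PySem.Dict (Nat × Nat) Int
  | i, j, memo =>
    match memo.get? (i, j) with
    | some v => (v, memo)
    | none =>
      if i = 0 ∨ j = 0 then
        (0, memo.insert (i, j) 0)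
      else if sl.getD (i - 1) ' ' = tl.getD (j - 1) ' ' then
        let r := pvLcs sl tl (i - 1) (j - 1) memo
        (r.1 + 1, r.2.insert (i, j) (r.1 + 1))
      else
        let r1 := pvLcs sl tl (i - 1) j memo
        let r2 := pvLcs sl tl i (j - 1) r1.2
        (max r1.1 r2.1, r2.2.insert (i, j) (max r1.1 r2.1))
termination_by i j _ => i + j
decreasing_by all_goals omega

def lcs_fitness_alt (individual_str : String) (target_str : String) (bonus_for_match : Int) : Int :=
  let sl := individual_str.toList
  let tl := target_str.toList
  let m := sl.length
  let n := tl.length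
  let lcs_length := (pvLcs sl tl m n PySem.Dict.empty).1
  let exact_matches : Int := ((sl.zip tl).countP (fun p => p.1 == p.2) : Nat)
  let max_possible_score := (n : Int) + bonus_for_match * (n : Int)
  max_possible_score - (lcs_length + bonus_for_match * exact_matches)

-- ===== PRECONDITION & SPEC =====
def Spec_lcs_fitness (individual_str : String) (target_str : String) (bonus_for_match : Int) (out : Int) : Prop := out = lcs_fitness_alt individual_str target_str bonus_for_match
instance (individual_str : String) (target_str : String) (bonus_for_match : Int) (out : Int) : Decidable (Spec_lcs_fitness individual_str target_str bonus_for_match out) := by unfold Spec_lcs_fitness; infer_instance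

-- ===== CLAIM (what is proved, stated in full; the proofs are below) =====
def Claim_equal_lcs_fitness : Prop := ∀ (individual_str : String) (target_str : String) (bonus_for_match : Int), Dom_lcs_fitness individual_str target_str bonus_for_match → Spec_lcs_fitness individual_str target_str bonus_for_match (lcs_fitness individual_str target_str bonus_for_match)

-- ===== LEMMAS AND PROOFS =====

-- the mathematical LCS-prefix table both programs compute: pvL sl tl i j = LCS length of sl[:i] and tl[:j]
def pvL (sl tl : List Char) : Nat → Nat → Int
  | 0, _ => 0
  | _ + 1, 0 => 0
  | i + 1, j + 1 =>
    if sl.getD i ' ' = tl.getD j ' ' then pvL sl tl i j + 1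
    else max (pvL sl tl i (j + 1)) (pvL sl tl (i + 1) j)
termination_by i j => (i, j)

lemma pvL_zero (sl tl : List Char) (j : Nat) : pvL sl tl 0 j = 0 := by cases j <;> simp [pvL]

lemma pvL_zero_right (sl tl : List Char) (i : Nat) : pvL sl tl i 0 = 0 := by cases i <;> simp [pvL]

lemma pvL_succ_succ (sl tl : List Char) (i j : Nat) :
    pvL sl tl (i + 1) (j + 1) =
      if sl.getD i ' ' = tl.getD j ' ' then pvL sl tl i j + 1
      else max (pvL sl tl i (j + 1)) (pvL sl tl (i + 1) j) := by simp [pvL]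

-- ===== B-side characterization: the memo invariant =====
-- a memo is good when every stored entry is the true LCS-prefix value
def pvGood (sl tl : List Char) (memo : PySem.Dict (Nat × Nat) Int) : Prop :=
  ∀ p v, memo.get? p = some v → v = pvL sl tl p.1 p.2

lemma pvGood_insert (sl tl : List Char) (memo : PySem.Dict (Nat × Nat) Int)
    (h : pvGood sl tl memo) (i j : Nat) (v : Int) (hv : v = pvL sl tl i j) :
    pvGood sl tl (memo.insert (i, j) v) := by
  intro p w hw
  rw [PySem.Dict.get?_insert] at hw
  split at hw
  · rename_i hp
    cases hw
    subst hp
    exact hv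
  · exact h p w hw

-- the memoized recursion returns the LCS-prefix value and keeps the memo good
lemma pvLcs_spec (sl tl : List Char) :
    ∀ i j memo, pvGood sl tl memo →
      (pvLcs sl tl i j memo).1 = pvL sl tl i j ∧ pvGood sl tl (pvLcs sl tl i j memo).2 := by
  intro i j memo hg
  induction i, j, memo using pvLcs.induct sl tl with
  | case1 i j memo v hget =>
    rw [pvLcs, hget]
    exact ⟨hg (i, j) v hget, hg⟩
  | case2 i j memo hget h0 =>
    rw [pvLcs, hget, if_pos h0]
    have hv : (0 : Int) = pvL sl tl i j := by
      rcases h0 with h | h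
      · subst h; rw [pvL_zero]
      · subst h; rw [pvL_zero_right]
    exact ⟨hv.symm ▸ by rw [← hv], pvGood_insert sl tl memo hg i j 0 hv⟩
  | case3 i j memo hget h0 heq ih =>
    obtain ⟨ih1, ih2⟩ := ih hg
    rw [pvLcs, hget, if_neg h0, if_pos heq]
    obtain ⟨i', rfl⟩ : ∃ i', i = i' + 1 := by
      rcases Nat.exists_eq_succ_of_ne_zero (by tauto : i ≠ 0) with ⟨i', hi⟩; exact ⟨i', hi⟩
    obtain ⟨j', rfl⟩ : ∃ j', j = j' + 1 := by
      rcases Nat.exists_eq_succ_of_ne_zero (by tauto : j ≠ 0) with ⟨j', hj⟩; exact ⟨j', hj⟩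
    simp only [Nat.add_sub_cancel] at ih1 ih2 heq ⊢
    have hv : (pvLcs sl tl i' j' memo).1 + 1 = pvL sl tl (i' + 1) (j' + 1) := by
      rw [pvL_succ_succ, if_pos heq, ih1]
    exact ⟨hv, pvGood_insert sl tl _ ih2 (i' + 1) (j' + 1) _ hv⟩
  | case4 i j memo hget h0 hne r1d ih1 ih2 =>
    obtain ⟨l1, l2⟩ := ih1 hg
    obtain ⟨r1, r2⟩ := ih2 l2
    rw [pvLcs, hget, if_neg h0, if_neg hne]
    obtain ⟨i', rfl⟩ : ∃ i', i = i' + 1 := by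
      rcases Nat.exists_eq_succ_of_ne_zero (by tauto : i ≠ 0) with ⟨i', hi⟩; exact ⟨i', hi⟩
    obtain ⟨j', rfl⟩ : ∃ j', j = j' + 1 := by
      rcases Nat.exists_eq_succ_of_ne_zero (by tauto : j ≠ 0) with ⟨j', hj⟩; exact ⟨j', hj⟩
    simp only [Nat.add_sub_cancel] at l1 l2 r1 r2 hne ⊢
    have r1' : (pvLcs sl tl (i' + 1) j' (pvLcs sl tl i' (j' + 1) memo).2).1
        = pvL sl tl (i' + 1) j' := r1
    have r2' : pvGood sl tl (pvLcs sl tl (i' + 1) j' (pvLcs sl tl i' (j' + 1) memo).2).2 := r2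
    have hv : max (pvLcs sl tl i' (j' + 1) memo).1
        (pvLcs sl tl (i' + 1) j' (pvLcs sl tl i' (j' + 1) memo).2).1
        = pvL sl tl (i' + 1) (j' + 1) := by
      rw [pvL_succ_succ, if_neg hne, l1, r1']
    exact ⟨hv, pvGood_insert sl tl _ r2' (i' + 1) (j' + 1) _ hv⟩

lemma pvGood_empty (sl tl : List Char) : pvGood sl tl PySem.Dict.empty := by
  intro p v hv
  rw [PySem.Dict.get?_empty] at hv
  cases hv

-- ===== A-side characterization =====
-- getD/set helpers
lemma pv_getD_set_eq {α : Type} (l : List α) (i : Nat) (v d : α) (h : i < l.length) :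
    (l.set i v).getD i d = v := by
  simp [List.getD, h]

lemma pv_getD_set_ne {α : Type} (l : List α) {i j : Nat} (v d : α) (h : i ≠ j) :
    (l.set i v).getD j d = l.getD j d := by
  simp [List.getD, List.getElem?_set_ne, h]

lemma pv_getD_replicate (k j : Nat) : (List.replicate k (0:Int)).getD j 0 = 0 := by
  simp [List.getD, List.getElem?_replicate]; split <;> simp

-- A's inner loop fills row i0+1 of the table left to right
lemma pvInnerA (sl tl : List Char) (i0 : Nat) (hi0 : i0 < sl.length)
    (dp : List (List Int))
    (hlen : dp.length = sl.length + 1)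
    (hprev : ∀ j ≤ tl.length, (dp.getD i0 []).getD j 0 = pvL sl tl i0 j)
    (hcur : dp.getD (i0 + 1) [] = List.replicate (tl.length + 1) 0) :
    ∀ t ≤ tl.length,
      let dp' := (List.range' 1 t).foldl (pvBodyA sl tl (i0 + 1)) dp
      dp'.length = sl.length + 1 ∧
      (∀ k, k ≠ i0 + 1 → dp'.getD k [] = dp.getD k []) ∧
      (dp'.getD (i0 + 1) []).length = tl.length + 1 ∧
      (∀ j ≤ t, (dp'.getD (i0 + 1) []).getD j 0 = pvL sl tl (i0 + 1) j) ∧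
      (∀ j, t < j → (dp'.getD (i0 + 1) []).getD j 0 = 0) := by
  intro t
  induction t with
  | zero =>
    intro _
    simp only [List.range'_zero, List.foldl_nil]
    refine ⟨hlen, fun k _ => trivial, ?_, ?_, ?_⟩
    · rw [hcur]; simp
    · intro j hj
      interval_cases j
      rw [hcur, pv_getD_replicate, pvL_zero_right]
    · intro j hj
      rw [hcur, pv_getD_replicate]
  | succ t iht =>
    intro ht
    have ht' : t ≤ tl.length := by omega
    obtain ⟨l1, l2, l3, l4, l5⟩ := iht ht'
    set dpt := (List.range' 1 t).foldl (pvBodyA sl tl (i0 + 1)) dp with hdpt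
    intro dp'
    have hfold : dp' = pvBodyA sl tl (i0 + 1) dpt (1 + t) := by
      simp only [dp', List.range'_1_concat, List.foldl_append, List.foldl_cons, List.foldl_nil,
        ← hdpt]
    have hne : i0 ≠ i0 + 1 := by omega
    have hrow0 : dpt.getD i0 [] = dp.getD i0 [] := l2 i0 hne
    have hv : (if sl.getD (i0 + 1 - 1) ' ' = tl.getD (1 + t - 1) ' ' then
          (dpt.getD (i0 + 1 - 1) []).getD (1 + t - 1) 0 + 1
        else
          max ((dpt.getD (i0 + 1 - 1) []).getD (1 + t) 0)
            ((dpt.getD (i0 + 1) []).getD (1 + t - 1) 0)) = pvL sl tl (i0 + 1) (t + 1) := by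
      have e0 : i0 + 1 - 1 = i0 := by omega
      have e1 : 1 + t - 1 = t := by omega
      have e2 : 1 + t = t + 1 := by omega
      rw [e0, e1, e2, hrow0, hprev t ht', hprev (t+1) ht, l4 t le_rfl, pvL_succ_succ]
    rw [hfold]
    unfold pvBodyA
    rw [hv]
    have hlt : i0 + 1 < dpt.length := by omega
    have hrowlen : (dpt.getD (i0 + 1) []).length = tl.length + 1 := l3
    have hset_eq : ∀ (r : List Int), (dpt.set (i0+1) r).getD (i0+1) [] = r :=
      fun r => pv_getD_set_eq dpt (i0+1) r [] hlt
    refine ⟨by simp [List.length_set, l1], ?_, ?_, ?_, ?_⟩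
    · intro k hk
      rw [pv_getD_set_ne dpt _ [] (fun h => hk h.symm), l2 k hk]
    · rw [hset_eq, List.length_set, hrowlen]
    · intro j hj
      rw [hset_eq]
      rcases eq_or_ne j (t + 1) with rfl | hne2
      · have e : 1 + t = t + 1 := by omega
        rw [e]
        exact pv_getD_set_eq _ _ _ _ (by rw [hrowlen]; omega)
      · have : 1 + t ≠ j := by omega
        rw [pv_getD_set_ne _ _ _ this]
        exact l4 j (by omega)
    · intro j hj
      rw [hset_eq, pv_getD_set_ne _ _ _ (by omega)]
      exact l5 j (by omega)

-- A's outer loop: after k rows, rows 0..k hold the LCS table and the rest are still zero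
lemma pvOuterA (sl tl : List Char) :
    ∀ k ≤ sl.length,
      let dp' := (List.range' 1 k).foldl
        (fun dp i => (List.range' 1 tl.length).foldl (pvBodyA sl tl i) dp)
        (List.replicate (sl.length + 1) (List.replicate (tl.length + 1) (0:Int)))
      dp'.length = sl.length + 1 ∧
      (∀ i ≤ k, ∀ j ≤ tl.length, (dp'.getD i []).getD j 0 = pvL sl tl i j) ∧
      (∀ i, k < i → i ≤ sl.length → dp'.getD i [] = List.replicate (tl.length + 1) 0) := by
  intro k
  induction k with
  | zero =>
    intro _
    simp only [List.range'_zero, List.foldl_nil]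
    refine ⟨by simp, ?_, ?_⟩
    · intro i hi j hj
      interval_cases i
      rw [List.getD_replicate _ (by omega), List.getD_replicate _ (by omega), pvL_zero]
    · intro i _ hi
      rw [List.getD_replicate _ (by omega)]
  | succ k ihk =>
    intro hk
    have hk' : k ≤ sl.length := by omega
    obtain ⟨l1, l2, l3⟩ := ihk hk'
    set dpk := (List.range' 1 k).foldl
        (fun dp i => (List.range' 1 tl.length).foldl (pvBodyA sl tl i) dp)
        (List.replicate (sl.length + 1) (List.replicate (tl.length + 1) (0:Int))) with hdpk
    intro dp'
    have hfold : dp' = (List.range' 1 tl.length).foldl (pvBodyA sl tl (k + 1)) dpk := by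
      simp only [dp', List.range'_1_concat, List.foldl_append, List.foldl_cons, List.foldl_nil,
        ← hdpk, Nat.add_comm 1 k]
    obtain ⟨m1, m2, m3, m4, m5⟩ := pvInnerA sl tl k (by omega) dpk l1
      (fun j hj => l2 k le_rfl j hj) (l3 (k+1) (by omega) (by omega)) tl.length le_rfl
    rw [hfold]
    refine ⟨m1, ?_, ?_⟩
    · intro i hi j hj
      rcases eq_or_ne i (k + 1) with rfl | hne
      · exact m4 j hj
      · rw [m2 i hne]
        exact l2 i (by omega) j hj
    · intro i hi hi'
      rw [m2 i (by omega)]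
      exact l3 i (by omega) hi'

-- ===== exact-match count =====
lemma pvCount_eq : ∀ (sl tl : List Char),
    (List.range sl.length).countP
      (fun i => decide (i < tl.length ∧ sl.getD i ' ' = tl.getD i ' '))
    = (sl.zip tl).countP (fun p => p.1 == p.2) := by
  intro sl
  induction sl with
  | nil => simp
  | cons a s ih =>
    intro tl
    cases tl with
    | nil => simp
    | cons b t =>
      simp only [List.length_cons]
      rw [List.range_succ_eq_map]
      simp only [List.countP_cons, List.countP_map, List.zip_cons_cons]
      have : ((List.range s.length).countP
          ((fun i => decide (i < t.length + 1 ∧ (a :: s).getD i ' ' = (b :: t).getD i ' '))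
            ∘ Nat.succ))
          = (s.zip t).countP (fun p => p.1 == p.2) := by
        rw [← ih t]
        apply List.countP_congr
        intro i _
        simp [Function.comp]
      congr 1
      by_cases hab : a = b <;> simp [hab]

-- A's index loop equals B's zip count
lemma pvExact_eq (sl tl : List Char) :
    (List.range sl.length).foldl
      (fun acc i => if i < tl.length ∧ sl.getD i ' ' = tl.getD i ' ' then acc + 1 else acc) (0:Int)
    = ((sl.zip tl).countP (fun p => p.1 == p.2) : Nat) := by
  have h := PySem.List.foldl_count_if
    (fun i => decide (i < tl.length ∧ sl.getD i ' ' = tl.getD i ' '))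
    (List.range sl.length) 0
  simp only [decide_eq_true_eq] at h
  rw [h, pvCount_eq]
  omega

-- ===== VERDICT (by name: the statement is the Claim_ definition above) =====
theorem lcs_fitness_spec : Claim_equal_lcs_fitness := by
  intro s t b _
  unfold Spec_lcs_fitness lcs_fitness lcs_fitness_alt
  obtain ⟨o1, o2, o3⟩ := pvOuterA s.toList t.toList s.toList.length le_rfl
  obtain ⟨b1, _⟩ := pvLcs_spec s.toList t.toList s.toList.length t.toList.length
    PySem.Dict.empty (pvGood_empty s.toList t.toList)
  simp only []
  rw [o2 s.toList.length le_rfl t.toList.length le_rfl, b1, pvExact_eq]
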